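-- pv_equiv track=rewrite | github.com/varun00391/ai_interviewer | backend/app/services/interview_flow.py | _engagement_from_transcript
-- ===== SOURCE A (Python) =====
-- def _engagement_from_transcript(transcript: list | None) -> dict[str, int]:
--     cand_contents: list[str] = []
--     for m in transcript or []:
--         if not isinstance(m, dict):
--             continue
--         if str(m.get("role", "")).lower() != "candidate":
--             continue
--         c = str(m.get("content", "")).strip()
--         if c:
--             cand_contents.append(c)
--     fillers = frozenset(
--         {
--             "yes",
--             "yeah",
--             "yep",
--             "no",
--             "nope",
--             "ok",
--             "okay",
--             "sure",
--             "hi",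
--             "hello",
--             "i don't know",
--             "idk",
--             "skip",
--             "nothing",
--         }
--     )
--     substantive: list[str] = []
--     for c in cand_contents:
--         low = c.lower().strip(" .!?")
--         if len(c) >= 14 and low not in fillers:
--             substantive.append(c)
--     return {
--         "candidate_turns": len(cand_contents),
--         "substantive_turns": len(substantive),
--         "total_candidate_chars": sum(len(x) for x in cand_contents),
--     }
-- ===== SOURCE B (Python) =====
-- def _engagement_from_transcript(transcript: list | None) -> dict[str, int]:
--     fillers = frozenset(
--         {
--             "yes",
--             "yeah",
--             "yep",
--             "no",
--             "nope",
--             "ok",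
--             "okay",
--             "sure",
--             "hi",
--             "hello",
--             "i don't know",
--             "idk",
--             "skip",
--             "nothing",
--         }
--     )
--     candidate_turns = 0
--     substantive_turns = 0
--     total_candidate_chars = 0
--     for m in transcript or []:
--         if not isinstance(m, dict):
--             continue
--         if str(m.get("role", "")).lower() != "candidate":
--             continue
--         c = str(m.get("content", "")).strip()
--         if not c:
--             continue
--         candidate_turns += 1
--         total_candidate_chars += len(c)
--         if len(c) >= 14 and c.lower().strip(" .!?") not in fillers:
--             substantive_turns += 1
--     return {
--         "candidate_turns": candidate_turns,
--         "substantive_turns": substantive_turns,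
--         "total_candidate_chars": total_candidate_chars,
--     }
-- ===== Notes on version B (the rewrite author's own statement) =====
-- stated objective: simpler
-- what changed: Replaced the two sequential passes that build the cand_contents and substantive lists (then reduce them with len/sum) by one loop over the transcript maintaining three integer counters directly.
import Mathlib
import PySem

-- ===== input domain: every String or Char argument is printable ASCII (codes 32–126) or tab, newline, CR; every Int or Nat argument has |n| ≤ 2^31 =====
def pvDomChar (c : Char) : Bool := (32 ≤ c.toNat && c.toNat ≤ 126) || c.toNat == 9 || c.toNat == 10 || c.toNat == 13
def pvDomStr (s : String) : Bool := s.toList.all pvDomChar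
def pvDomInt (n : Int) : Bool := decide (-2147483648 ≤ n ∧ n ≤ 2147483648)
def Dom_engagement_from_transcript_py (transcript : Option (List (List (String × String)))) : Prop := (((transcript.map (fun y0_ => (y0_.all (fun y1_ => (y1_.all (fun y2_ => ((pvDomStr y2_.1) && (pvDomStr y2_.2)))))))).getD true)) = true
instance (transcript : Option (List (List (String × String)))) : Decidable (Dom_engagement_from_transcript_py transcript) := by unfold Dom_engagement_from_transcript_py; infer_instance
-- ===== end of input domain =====

-- B replaces A's two list-building passes (cand_contents, substantive) and their len/sum
-- reductions by a single loop over the transcript keeping three integer counters (objective: simpler).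

-- shared primitives (the same sub-expressions occur verbatim in both Pythons)
def pvFillers : PySem.Set String :=
  PySem.Set.ofList ["yes", "yeah", "yep", "no", "nope", "ok", "okay", "sure", "hi", "hello",
    "i don't know", "idk", "skip", "nothing"]

-- str(m.get("role", "")).lower() == "candidate"  (isinstance(m, dict) is always true under the type convention)
def pvIsCand (m : List (String × String)) : Bool :=
  PySem.Str.lower ((PySem.Dict.mk m).getD "role" "") == "candidate"

-- str(m.get("content", "")).strip()
def pvContent (m : List (String × String)) : String :=
  PySem.Str.strip ((PySem.Dict.mk m).getD "content" "")

-- len(c) >= 14 and c.lower().strip(" .!?") not in fillers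
def pvSubst (c : String) : Bool :=
  (14 ≤ PySem.Str.len c) && !(pvFillers.contains (PySem.Str.stripChars (PySem.Str.lower c) " .!?"))

-- ===== PORT A =====
def engagement_from_transcript_py (transcript : Option (List (List (String × String)))) : List (String × Int) :=
  let cand_contents : List String :=
    (transcript.getD []).foldl (fun acc m =>
      if pvIsCand m then
        if pvContent m == "" then acc else acc ++ [pvContent m]
      else acc) []
  let substantive : List String :=
    cand_contents.foldl (fun acc c => if pvSubst c then acc ++ [c] else acc) []
  [("candidate_turns", PySem.List.len cand_contents),
   ("substantive_turns", PySem.List.len substantive),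
   ("total_candidate_chars", (cand_contents.map (fun x => PySem.Str.len x)).sum)]

-- ===== PORT B =====
def engagement_from_transcript_py_alt (transcript : Option (List (List (String × String)))) : List (String × Int) :=
  let r : Int × Int × Int :=
    (transcript.getD []).foldl (fun acc m =>
      if pvIsCand m then
        if pvContent m == "" then acc
        else (acc.1 + 1,
              acc.2.1 + (if pvSubst (pvContent m) then 1 else 0),
              acc.2.2 + PySem.Str.len (pvContent m))
      else acc) (0, 0, 0)
  [("candidate_turns", r.1), ("substantive_turns", r.2.1), ("total_candidate_chars", r.2.2)]

-- ===== PRECONDITION & SPEC =====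
def Spec_engagement_from_transcript_py (transcript : Option (List (List (String × String)))) (out : List (String × Int)) : Prop := out = engagement_from_transcript_py_alt transcript
instance (transcript : Option (List (List (String × String)))) (out : List (String × Int)) : Decidable (Spec_engagement_from_transcript_py transcript out) := by unfold Spec_engagement_from_transcript_py; infer_instance

-- ===== CLAIM (what is proved, stated in full; the proofs are below) =====
def Claim_equal_engagement_from_transcript_py : Prop := ∀ (transcript : Option (List (List (String × String)))), Dom_engagement_from_transcript_py transcript → Spec_engagement_from_transcript_py transcript (engagement_from_transcript_py transcript)

-- ===== LEMMAS AND PROOFS =====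

-- messages A's first loop keeps
def pvKeep (m : List (String × String)) : Bool := pvIsCand m && !(pvContent m == "")

-- A's first loop builds the stripped contents of the kept messages, after the initial accumulator
lemma pv_loop1_eq (ms : List (List (String × String))) : ∀ acc : List String,
    ms.foldl (fun acc m =>
      if pvIsCand m then
        if pvContent m == "" then acc else acc ++ [pvContent m]
      else acc) acc
    = acc ++ (ms.filter pvKeep).map pvContent := by
  induction ms with
  | nil => intro acc; simp
  | cons m ms ih =>
    intro acc
    simp only [List.foldl_cons]
    by_cases h1 : pvIsCand m
    · by_cases h2 : (pvContent m == "") = true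
      · rw [if_pos h1, if_pos h2, ih, List.filter_cons_of_neg (by simp [pvKeep, h1, h2])]
      · rw [if_pos h1, if_neg h2, ih, List.filter_cons_of_pos (by simp [pvKeep, h1, h2]),
          List.map_cons]
        simp
    · rw [if_neg h1, ih, List.filter_cons_of_neg (by simp [pvKeep, h1])]

-- B's loop computes the three counters of A's kept contents, shifted by the initial accumulator
lemma pv_loopB_eq (ms : List (List (String × String))) : ∀ t s c : Int,
    ms.foldl (fun acc m =>
      if pvIsCand m then
        if pvContent m == "" then acc
        else (acc.1 + 1,
              acc.2.1 + (if pvSubst (pvContent m) then 1 else 0),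
              acc.2.2 + PySem.Str.len (pvContent m))
      else acc) (t, s, c)
    = (t + (((ms.filter pvKeep).map pvContent).length : Int),
       s + ((((ms.filter pvKeep).map pvContent).filter pvSubst).length : Int),
       c + (((ms.filter pvKeep).map pvContent).map (fun x => PySem.Str.len x)).sum) := by
  induction ms with
  | nil =>
    intro t s c
    simp only [List.foldl_nil, List.filter_nil, List.map_nil, List.length_nil, List.sum_nil,
      Nat.cast_zero, add_zero]
  | cons m ms ih =>
    intro t s c
    simp only [List.foldl_cons]
    by_cases h1 : pvIsCand m
    · by_cases h2 : (pvContent m == "") = true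
      · rw [if_pos h1, if_pos h2, ih, List.filter_cons_of_neg (by simp [pvKeep, h1, h2])]
      · rw [if_pos h1, if_neg h2, ih, List.filter_cons_of_pos (by simp [pvKeep, h1, h2]),
          List.map_cons, List.map_cons]
        refine Prod.ext ?_ (Prod.ext ?_ ?_)
        · simp only [List.length_cons]; push_cast; ring
        · by_cases h3 : pvSubst (pvContent m)
          · rw [if_pos h3, List.filter_cons_of_pos h3]
            simp only [List.length_cons]; push_cast; ring
          · rw [if_neg h3, List.filter_cons_of_neg h3]
            ring
        · simp only [List.sum_cons]; ring
    · rw [if_neg h1, ih, List.filter_cons_of_neg (by simp [pvKeep, h1])]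

-- ===== VERDICT (by name: the statement is the Claim_ definition above) =====
theorem engagement_from_transcript_py_spec : Claim_equal_engagement_from_transcript_py := by
  unfold Claim_equal_engagement_from_transcript_py
  intro transcript _
  unfold Spec_engagement_from_transcript_py
  simp only [engagement_from_transcript_py, engagement_from_transcript_py_alt]
  rw [pv_loop1_eq, List.nil_append, PySem.List.foldl_append_if_eq_filter, pv_loopB_eq]
  simp [PySem.List.len_eq]
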